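-- pv_equiv track=rewrite | github.com/Raiden-Numerics/mufem | .scripts/check_math.py | mask_ranges
-- ===== SOURCE A (Python) =====
-- def mask_ranges(s: str, ranges: list[tuple[int, int]], fill: str = " ") -> str:
--     if not ranges:
--         return s
--     arr = list(s)
--     for a, b in ranges:
--         for i in range(max(0, a), min(len(arr), b)):
--             arr[i] = fill
--     return "".join(arr)
-- ===== SOURCE B (Python) =====
-- def mask_ranges(s: str, ranges: list[tuple[int, int]], fill: str = " ") -> str:
--     if not ranges:
--         return s
--     n = len(s)
--     diff = [0] * (n + 1)
--     for a, b in ranges: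
--         a = max(0, a)
--         b = min(n, b)
--         if a < b:
--             diff[a] += 1
--             diff[b] -= 1
--     out = []
--     cnt = 0
--     for i, ch in enumerate(s):
--         cnt += diff[i]
--         out.append(fill if cnt > 0 else ch)
--     return "".join(out)
-- ===== Notes on version B (the rewrite author's own statement) =====
-- stated objective: alternative
-- what changed: Replaces the per-range position-by-position overwrite loop with a difference array (increment/decrement at clamped range boundaries) followed by a single prefix-sum scan that emits fill or the original character per position.
import Mathlib
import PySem

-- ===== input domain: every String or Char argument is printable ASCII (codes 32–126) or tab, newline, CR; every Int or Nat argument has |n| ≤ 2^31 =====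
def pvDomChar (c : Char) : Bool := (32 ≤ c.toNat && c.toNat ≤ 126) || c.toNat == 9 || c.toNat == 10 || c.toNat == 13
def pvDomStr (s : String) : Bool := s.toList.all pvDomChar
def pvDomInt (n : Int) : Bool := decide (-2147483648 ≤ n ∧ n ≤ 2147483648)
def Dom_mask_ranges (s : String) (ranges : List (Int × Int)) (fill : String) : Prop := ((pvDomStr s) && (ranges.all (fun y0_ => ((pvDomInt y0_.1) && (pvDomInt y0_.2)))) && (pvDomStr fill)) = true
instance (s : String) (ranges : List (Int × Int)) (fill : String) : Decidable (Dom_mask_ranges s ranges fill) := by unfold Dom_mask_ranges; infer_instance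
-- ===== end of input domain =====

-- B replaces A's per-range position-by-position overwrite with a difference array and a
-- single prefix-sum scan (objective: alternative).  "".join is ported as flatten over
-- List Char entries (exact for separator "").


-- ===== PORT A =====
-- arr = list(s): each element is the content of a 1-char string; arr[i] = fill stores fill's
-- characters; "".join(arr) = flatten.
def mask_ranges (s : String) (ranges : List (Int × Int)) (fill : String) : String :=
  if ranges = [] then s
  else
    let arr : List (List Char) := s.toList.map (fun c => [c])
    let arr := ranges.foldl (fun arr p =>
      (PySem.List.pyRange (max 0 p.1) (min (PySem.List.len arr) p.2) 1).foldl
        (fun arr i => PySem.List.pySetD arr i fill.toList) arr) arr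
    String.ofList arr.flatten

-- ===== PORT B =====
def mask_ranges_alt (s : String) (ranges : List (Int × Int)) (fill : String) : String :=
  if ranges = [] then s
  else
    let n : Int := PySem.List.len s.toList
    let diff : List Int := List.replicate (s.toList.length + 1) 0
    let diff := ranges.foldl (fun d p =>
      let a := max 0 p.1
      let b := min n p.2
      if a < b then
        let d1 := PySem.List.pySetD d a (PySem.List.pyGetD d a 0 + 1)
        PySem.List.pySetD d1 b (PySem.List.pyGetD d1 b 0 - 1)
      else d) diff
    let st := (PySem.List.enumerate s.toList 0).foldl
      (fun (st : Int × List (List Char)) (p : Int × Char) =>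
        let cnt := st.1 + PySem.List.pyGetD diff p.1 0
        (cnt, st.2 ++ [if cnt > 0 then fill.toList else [p.2]])) (0, [])
    String.ofList st.2.flatten

-- ===== PRECONDITION & SPEC =====
def Spec_mask_ranges (s : String) (ranges : List (Int × Int)) (fill : String) (out : String) : Prop := out = mask_ranges_alt s ranges fill
instance (s : String) (ranges : List (Int × Int)) (fill : String) (out : String) : Decidable (Spec_mask_ranges s ranges fill out) := by unfold Spec_mask_ranges; infer_instance

-- ===== CLAIM (what is proved, stated in full; the proofs are below) =====
def Claim_equal_mask_ranges : Prop := ∀ (s : String) (ranges : List (Int × Int)) (fill : String), Dom_mask_ranges s ranges fill → Spec_mask_ranges s ranges fill (mask_ranges s ranges fill)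

-- ===== LEMMAS AND PROOFS =====

-- covered-by-some-range test at position k (string length n)
def mrCov (n : Nat) (ranges : List (Int × Int)) (k : Nat) : Bool :=
  ranges.any (fun p => decide (max 0 p.1 ≤ (k:Int) ∧ (k:Int) < min (n:Int) p.2))

-- prefix sum of the first t entries of the difference array
def mrS (d : List Int) (t : Nat) : Int := ∑ j ∈ Finset.range t, d.getD j 0

-- B's difference-array update for one range
def mrUpd (n : Int) (d : List Int) (p : Int × Int) : List Int :=
  if max 0 p.1 < min n p.2 then
    PySem.List.pySetD (PySem.List.pySetD d (max 0 p.1) (PySem.List.pyGetD d (max 0 p.1) 0 + 1))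
      (min n p.2)
      (PySem.List.pyGetD (PySem.List.pySetD d (max 0 p.1) (PySem.List.pyGetD d (max 0 p.1) 0 + 1)) (min n p.2) 0 - 1)
  else d

-- ---- A side ----

theorem mr_innerA (fill : List Char) (b : Int) (m : Nat) :
    ∀ (a : Int), (b - a).toNat = m → 0 ≤ a → ∀ (arr : List (List Char)), b ≤ (arr.length : Int) →
      (((PySem.List.pyRange a b 1).foldl (fun ar i => PySem.List.pySetD ar i fill) arr).length = arr.length ∧
       ∀ k : Nat, ((PySem.List.pyRange a b 1).foldl (fun ar i => PySem.List.pySetD ar i fill) arr)[k]? =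
         if a ≤ (k:Int) ∧ (k:Int) < b then some fill else arr[k]?) := by
  induction m with
  | zero =>
    intro a hm ha arr hb
    rw [PySem.List.pyRange_one_eq_nil (by omega)]
    exact ⟨rfl, fun k => by rw [if_neg (by omega)]; rfl⟩
  | succ m ih =>
    intro a hm ha arr hb
    rw [PySem.List.pyRange_one_cons (by omega)]
    simp only [List.foldl_cons]
    rw [PySem.List.pySetD_of_nonneg arr fill ha]
    have hlen : (arr.set a.toNat fill).length = arr.length := by simp
    obtain ⟨ih1, ih2⟩ := ih (a+1) (by omega) (by omega) (arr.set a.toNat fill) (by omega)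
    refine ⟨by rw [ih1, hlen], fun k => ?_⟩
    rw [ih2 k]
    by_cases hk1 : (a+1) ≤ (k:Int) ∧ (k:Int) < b
    · rw [if_pos hk1, if_pos (by omega)]
    · rw [if_neg hk1]
      by_cases hk2 : (k:Int) = a
      · have hkn : k = a.toNat := by omega
        rw [if_pos (by omega), hkn, List.getElem?_set_self (by omega)]
      · rw [if_neg (by omega), List.getElem?_set_ne (by omega)]

theorem mr_outerA (fill : List Char) (n : Nat) :
    ∀ (ranges : List (Int × Int)) (arr : List (List Char)), arr.length = n →
      ((ranges.foldl (fun arr p =>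
          (PySem.List.pyRange (max 0 p.1) (min (PySem.List.len arr) p.2) 1).foldl
            (fun ar i => PySem.List.pySetD ar i fill) arr) arr).length = n ∧
       ∀ k : Nat, (ranges.foldl (fun arr p =>
          (PySem.List.pyRange (max 0 p.1) (min (PySem.List.len arr) p.2) 1).foldl
            (fun ar i => PySem.List.pySetD ar i fill) arr) arr)[k]? =
         if mrCov n ranges k then some fill else arr[k]?) := by
  intro ranges
  induction ranges with
  | nil => intro arr h; exact ⟨h, fun k => by simp [mrCov]⟩
  | cons p rest ih =>
    intro arr h
    simp only [List.foldl_cons]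
    obtain ⟨in1, in2⟩ := mr_innerA fill (min (PySem.List.len arr) p.2) _ (max 0 p.1) rfl
      (by omega) arr (by simp [PySem.List.len_eq])
    obtain ⟨ih1, ih2⟩ := ih _ (by rw [in1, h])
    refine ⟨ih1, fun k => ?_⟩
    have hcov : (mrCov n (p :: rest) k : Bool)
        = (decide (max 0 p.1 ≤ (k:Int) ∧ (k:Int) < min (n:Int) p.2) || mrCov n rest k) := by
      simp [mrCov]
    rw [ih2 k, in2 k, hcov]
    simp only [PySem.List.len_eq, h]
    by_cases hrest : mrCov n rest k
    · simp [hrest]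
    · simp [hrest]

-- ---- B side ----

theorem mr_S_set (d : List Int) (m : Nat) (hm : m < d.length) (v : Int) (t : Nat) :
    mrS (d.set m v) t = mrS d t + (if m < t then v - d.getD m 0 else 0) := by
  unfold mrS
  have h : ∀ j, (d.set m v).getD j 0 = d.getD j 0 + (if j = m then v - d.getD m 0 else 0) := by
    intro j
    by_cases hj : j = m
    · subst hj; simp [List.getD, List.getElem?_set_self hm]
    · simp [List.getD, List.getElem?_set_ne (by omega : m ≠ j), hj]
  simp only [h, Finset.sum_add_distrib, Finset.sum_ite_eq' (Finset.range t) m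
    (fun _ => v - d.getD m 0), Finset.mem_range]

theorem mr_len_upd (n : Int) (d : List Int) (p : Int × Int) : (mrUpd n d p).length = d.length := by
  unfold mrUpd
  split
  · simp [PySem.List.length_pySetD]
  · rfl

theorem mr_S_upd (n : Nat) (d : List Int) (hlen : d.length = n+1) (p : Int × Int) (t : Nat) :
    mrS (mrUpd (n:Int) d p) t
      = mrS d t + (if max 0 p.1 < (t:Int) ∧ (t:Int) ≤ min (n:Int) p.2 then 1 else 0) := by
  unfold mrUpd
  by_cases hab : max 0 p.1 < min ((n:Int)) p.2
  · rw [if_pos hab]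
    have ha : (0:Int) ≤ max 0 p.1 := by omega
    have hb : (0:Int) ≤ min (n:Int) p.2 := by omega
    rw [PySem.List.pySetD_of_nonneg d _ ha, PySem.List.pyGetD_of_nonneg d _ ha,
        PySem.List.pySetD_of_nonneg _ _ hb, PySem.List.pyGetD_of_nonneg _ _ hb]
    set aN := (max 0 p.1).toNat with haN
    set bN := (min (n:Int) p.2).toNat with hbN
    have hane : aN ≠ bN := by omega
    have haL : aN < d.length := by omega
    have hbL : bN < d.length := by omega
    have hgb : (d.set aN (d.getD aN 0 + 1)).getD bN 0 = d.getD bN 0 := by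
      simp [List.getD, List.getElem?_set_ne hane]
    rw [hgb, mr_S_set _ bN (by simpa using hbL) _ t, mr_S_set d aN haL _ t, hgb]
    have hc1 : aN < t ↔ max 0 p.1 < (t:Int) := by omega
    have hc2 : bN < t ↔ min (n:Int) p.2 < (t:Int) := by omega
    split_ifs <;> omega
  · rw [if_neg hab, if_neg (by omega)]
    omega

theorem mr_fold_upd (n : Nat) (t : Nat) :
    ∀ (ranges : List (Int × Int)) (d : List Int), d.length = n+1 →
      (ranges.foldl (mrUpd (n:Int)) d).length = n+1 ∧
      mrS (ranges.foldl (mrUpd (n:Int)) d) t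
        = mrS d t + (ranges.countP (fun p => decide (max 0 p.1 < (t:Int) ∧ (t:Int) ≤ min (n:Int) p.2)) : Int) := by
  intro ranges
  induction ranges with
  | nil => intro d h; simp [h]
  | cons p rest ih =>
    intro d h
    simp only [List.foldl_cons]
    obtain ⟨ih1, ih2⟩ := ih (mrUpd (n:Int) d p) (by rw [mr_len_upd, h])
    refine ⟨ih1, ?_⟩
    rw [ih2, mr_S_upd n d h p t, List.countP_cons]
    by_cases hc : (max 0 p.1 < (t:Int) ∧ (t:Int) ≤ min (n:Int) p.2)
    · simp only [decide_eq_true_eq, hc]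
      push_cast
      ring
    · simp only [decide_eq_true_eq, hc]
      push_cast
      ring

theorem mr_S_zero_diff (n : Nat) (t : Nat) : mrS (List.replicate (n+1) (0:Int)) t = 0 := by
  unfold mrS
  simp [List.getD]

-- covered ↔ positive prefix sum of the built difference array
theorem mr_cov_iff (n : Nat) (ranges : List (Int × Int)) (k : Nat) :
    (mrCov n ranges k = true)
      ↔ 0 < mrS (ranges.foldl (mrUpd (n:Int)) (List.replicate (n+1) 0)) (k+1) := by
  obtain ⟨-, h2⟩ := mr_fold_upd n (k+1) ranges (List.replicate (n+1) 0) (by simp)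
  rw [h2, mr_S_zero_diff, zero_add]
  unfold mrCov
  rw [List.any_eq_true]
  have hcnt : ∀ p : Int × Int,
      (decide (max 0 p.1 ≤ (k:Int) ∧ (k:Int) < min (n:Int) p.2) = true)
        ↔ (fun p => decide (max 0 p.1 < ((k+1:Nat):Int) ∧ ((k+1:Nat):Int) ≤ min (n:Int) p.2)) p = true := by
    intro p; simp only [decide_eq_true_eq]; push_cast; omega
  constructor
  · rintro ⟨p, hp, hc⟩
    have : 0 < List.countP (fun p => decide (max 0 p.1 < ((k+1:Nat):Int) ∧ ((k+1:Nat):Int) ≤ min (n:Int) p.2)) ranges :=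
      List.countP_pos_iff.mpr ⟨p, hp, (hcnt p).mp hc⟩
    omega
  · intro hpos
    have : 0 < List.countP (fun p => decide (max 0 p.1 < ((k+1:Nat):Int) ∧ ((k+1:Nat):Int) ≤ min (n:Int) p.2)) ranges := by
      omega
    obtain ⟨p, hp, hc⟩ := List.countP_pos_iff.mp this
    exact ⟨p, hp, (hcnt p).mpr hc⟩

-- B's scan over enumerate, characterised
theorem mr_scanB (d : List Int) (fill : List Char) :
    ∀ (tail : List Char) (t : Nat) (acc : List (List Char)),
      ((PySem.List.enumerate tail (t:Int)).foldl
         (fun (st : Int × List (List Char)) (p : Int × Char) =>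
           (st.1 + PySem.List.pyGetD d p.1 0,
            st.2 ++ [if st.1 + PySem.List.pyGetD d p.1 0 > 0 then fill else [p.2]])) (mrS d t, acc)).2
      = acc ++ (tail.zipIdx t).map (fun q => if mrS d (q.2+1) > 0 then fill else [q.1]) := by
  intro tail
  induction tail with
  | nil => intro t acc; simp [PySem.List.enumerate_nil]
  | cons x xs ih =>
    intro t acc
    rw [PySem.List.enumerate_cons]
    simp only [List.foldl_cons, List.zipIdx_cons, List.map_cons]
    have hc : mrS d t + PySem.List.pyGetD d (t:Int) 0 = mrS d (t+1) := by
      rw [PySem.List.pyGetD_natCast]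
      unfold mrS
      rw [Finset.sum_range_succ]
    have hcast : (t:Int) + 1 = ((t+1:Nat):Int) := by push_cast; ring
    simp only [hc, hcast]
    rw [ih (t+1) (acc ++ [if mrS d (t+1) > 0 then fill else [x]])]
    simp

-- ===== VERDICT (by name: the statement is the Claim_ definition above) =====
theorem mask_ranges_spec : Claim_equal_mask_ranges := by
  intro s ranges fill _
  unfold Spec_mask_ranges mask_ranges mask_ranges_alt
  by_cases hr : ranges = []
  · simp [hr]
  · simp only [if_neg hr]
    have hupd : (fun (d : List Int) (p : Int × Int) =>
        if max 0 p.1 < min (PySem.List.len s.toList) p.2 then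
          PySem.List.pySetD (PySem.List.pySetD d (max 0 p.1) (PySem.List.pyGetD d (max 0 p.1) 0 + 1))
            (min (PySem.List.len s.toList) p.2)
            (PySem.List.pyGetD (PySem.List.pySetD d (max 0 p.1) (PySem.List.pyGetD d (max 0 p.1) 0 + 1))
              (min (PySem.List.len s.toList) p.2) 0 - 1)
        else d) = mrUpd ((s.toList.length : Int)) := rfl
    rw [hupd]
    set cs := s.toList with hcs
    set n := cs.length with hn
    set diff := ranges.foldl (mrUpd (n:Int)) (List.replicate (n+1) 0) with hdiff
    have h0 : mrS diff 0 = 0 := by unfold mrS; simp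
    have hB := mr_scanB diff fill.toList cs 0 []
    rw [Nat.cast_zero, h0] at hB
    rw [hB]
    obtain ⟨hA1, hA2⟩ := mr_outerA fill.toList n ranges (cs.map (fun c => [c])) (by simp [hn])
    have hfin : (ranges.foldl (fun arr p =>
        (PySem.List.pyRange (max 0 p.1) (min (PySem.List.len arr) p.2) 1).foldl
          (fun ar i => PySem.List.pySetD ar i fill.toList) arr) (cs.map (fun c => [c])))
        = (cs.zipIdx 0).map (fun q => if mrS diff (q.2+1) > 0 then fill.toList else [q.1]) := by
      apply List.ext_getElem?
      intro k
      rw [hA2 k]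
      simp only [List.getElem?_map, List.getElem?_zipIdx, Nat.zero_add]
      by_cases hk : k < n
      · rw [List.getElem?_eq_getElem hk]
        simp only [Option.map_some]
        by_cases hcov : mrCov n ranges k
        · rw [if_pos hcov, if_pos (by
            have := (mr_cov_iff n ranges k).mp hcov
            rw [← hdiff] at this
            simpa using this)]
        · rw [if_neg hcov, if_neg (by
            intro hpos
            exact hcov ((mr_cov_iff n ranges k).mpr (by rw [← hdiff]; simpa using hpos)))]
      · have hcf : mrCov n ranges k = false := by
          simp only [mrCov, List.any_eq_false, decide_eq_true_eq]
          intro p hp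
          omega
        have hnone : cs[k]? = none := by rw [List.getElem?_eq_none_iff]; omega
        rw [hnone, hcf]
        simp
    rw [hfin]
    simp
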